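-- pv_equiv track=rewrite | github.com/saltchicken/fripper | src/fripper/deduper.py | filter_consecutive
-- ===== SOURCE A (Python) =====
-- def filter_consecutive(lst, min_length=10):
--     if not lst:
--         return []
--
--     lst.sort()
--     filtered = []
--     temp = [lst[0]]
--
--     for i in range(1, len(lst)):
--         if lst[i] == temp[-1] + 1:
--             temp.append(lst[i])
--         else:
--             if len(temp) >= min_length:
--                 filtered.extend(temp)
--             temp = [lst[i]]
--
--     if len(temp) >= min_length:
--         filtered.extend(temp)
--
--     return filtered
-- ===== SOURCE B (Python) =====
-- def filter_consecutive(lst, min_length=10):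
--     if not lst:
--         return []
--
--     lst.sort()
--     result = []
--     n = len(lst)
--     i = 0
--     while i < n:
--         j = i + 1
--         while j < n and lst[j] == lst[j - 1] + 1:
--             j += 1
--         if j - i >= min_length:
--             result.extend(lst[i:j])
--         i = j
--     return result
-- ===== Notes on version B (the rewrite author's own statement) =====
-- stated objective: alternative
-- what changed: Replaces A's element-by-element temp-list accumulator with a two-pointer scan that finds each maximal consecutive run's index boundaries and copies qualifying runs out with a single slice; no temp list is built or flushed.
import Mathlib
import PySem

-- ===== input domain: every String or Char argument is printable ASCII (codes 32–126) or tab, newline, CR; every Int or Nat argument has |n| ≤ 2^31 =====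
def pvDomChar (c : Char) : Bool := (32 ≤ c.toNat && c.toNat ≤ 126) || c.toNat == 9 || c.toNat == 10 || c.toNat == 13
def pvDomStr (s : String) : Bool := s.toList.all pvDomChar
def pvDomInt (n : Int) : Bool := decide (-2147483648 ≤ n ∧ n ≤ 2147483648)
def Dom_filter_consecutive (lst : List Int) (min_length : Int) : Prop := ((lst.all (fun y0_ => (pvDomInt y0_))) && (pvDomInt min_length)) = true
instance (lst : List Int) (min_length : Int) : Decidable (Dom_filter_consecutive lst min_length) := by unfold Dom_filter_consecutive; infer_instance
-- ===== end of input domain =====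

-- B replaces A's temp-list accumulator with a two-pointer scan over run boundaries (alternative
-- decomposition, same cost). Both A and B sort the argument in place; the theorems below are about
-- the RETURN value (B performs the same mutation).

-- ===== PORT A =====
-- one loop-body step of A's for-loop: st = (filtered, temp), x = lst[i]
def pvAStep (min_length : Int) (st : List Int × List Int) (x : Int) : List Int × List Int :=
  -- temp[-1]: temp is never empty while the loop runs
  if x = (PySem.List.pyGet? st.2 (-1)).getD 0 + 1 then (st.1, st.2 ++ [x])
  else if min_length ≤ (st.2.length : Int) then (st.1 ++ st.2, [x]) else (st.1, [x])

def filter_consecutive (lst : List Int) (min_length : Int) : List Int :=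
  if lst = [] then []
  else
    let s := PySem.List.sorted lst (fun x => x) false       -- lst.sort()
    let st := (PySem.List.pyRange 1 (s.length : Int) 1).foldl
        (fun st i => pvAStep min_length st (PySem.List.pyGetD s i 0))
        ([], [PySem.List.pyGetD s 0 0])
    if min_length ≤ (st.2.length : Int) then st.1 ++ st.2 else st.1

-- ===== PORT B =====
-- inner while loop: advance j while j < n and lst[j] == lst[j-1] + 1
def pvRunEnd (s : List Int) (j : Nat) : Nat :=
  if h : j < s.length then
    if s.getD j 0 = s.getD (j - 1) 0 + 1 then pvRunEnd s (j + 1) else j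
  else j
termination_by s.length - j

theorem pvRunEnd_ge (s : List Int) (j : Nat) : j ≤ pvRunEnd s j := by
  unfold pvRunEnd
  split
  · split
    · exact le_trans (by omega) (pvRunEnd_ge s (j + 1))
    · exact le_refl j
  · exact le_refl j
termination_by s.length - j

-- outer while loop: result accumulator and run-start index i
def pvAltLoop (s : List Int) (m : Int) (acc : List Int) (i : Nat) : List Int :=
  if _h : i < s.length then
    let j := pvRunEnd s (i + 1)
    pvAltLoop s m
      (if m ≤ (j : Int) - (i : Int) then acc ++ PySem.List.slice s (some (i : Int)) (some (j : Int)) else acc) j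
  else acc
termination_by s.length - i
decreasing_by
  have := pvRunEnd_ge s (i + 1)
  omega

def filter_consecutive_alt (lst : List Int) (min_length : Int) : List Int :=
  if lst = [] then []
  else pvAltLoop (PySem.List.sorted lst (fun x => x) false) min_length [] 0

-- ===== PRECONDITION & SPEC =====
def Spec_filter_consecutive (lst : List Int) (min_length : Int) (out : List Int) : Prop := out = filter_consecutive_alt lst min_length
instance (lst : List Int) (min_length : Int) (out : List Int) : Decidable (Spec_filter_consecutive lst min_length out) := by unfold Spec_filter_consecutive; infer_instance

-- ===== CLAIM (what is proved, stated in full; the proofs are below) =====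
def Claim_equal_filter_consecutive : Prop := ∀ (lst : List Int) (min_length : Int), Dom_filter_consecutive lst min_length → Spec_filter_consecutive lst min_length (filter_consecutive lst min_length)

-- ===== LEMMAS AND PROOFS =====

theorem pvRunEnd_le (s : List Int) (j : Nat) (h : j ≤ s.length) : pvRunEnd s j ≤ s.length := by
  unfold pvRunEnd
  split
  · split
    · exact pvRunEnd_le s (j + 1) (by omega)
    · exact h
  · exact h
termination_by s.length - j

-- proof-only intermediate: split off the maximal run of consecutive successors of p
def pvTakeRun (p : Int) : List Int → List Int × List Int
  | [] => ([], [])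
  | x :: xs => if x = p + 1 then ((x :: (pvTakeRun x xs).1), (pvTakeRun x xs).2) else ([], x :: xs)

theorem pvTakeRun_snd_length (p : Int) (xs : List Int) : (pvTakeRun p xs).2.length ≤ xs.length := by
  induction xs generalizing p with
  | nil => simp [pvTakeRun]
  | cons x xs ih =>
    simp only [pvTakeRun]
    split
    · exact le_trans (ih x) (by simp)
    · simp

-- proof-only intermediate: the maximal runs of a list
def pvRuns : List Int → List (List Int)
  | [] => []
  | x :: xs => (x :: (pvTakeRun x xs).1) :: pvRuns (pvTakeRun x xs).2
termination_by l => l.length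
decreasing_by
  have := pvTakeRun_snd_length x xs
  simp
  omega

def pvG (m : Int) (acc g : List Int) : List Int := if m ≤ (g.length : Int) then acc ++ g else acc

theorem pvLast_pyGet (t : List Int) (p : Int) (h : t.getLast? = some p) :
    (PySem.List.pyGet? t (-1)).getD 0 = p := by
  cases t with
  | nil => simp at h
  | cons a l =>
    simp only [PySem.List.pyGet?, PySem.List.pyIdx?]
    rw [if_neg (by norm_num), if_pos (by simp)]
    rw [List.getLast?_eq_getElem?] at h
    simp at h ⊢
    simp [h]

-- A's loop, started with nonempty temp t whose last element is p, equals the runs-based fold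
theorem pvA_runs (m : Int) (xs : List Int) (filtered t : List Int) (p : Int)
    (h : t.getLast? = some p) :
    (let st := xs.foldl (fun st x => pvAStep m st x) (filtered, t);
     if m ≤ (st.2.length : Int) then st.1 ++ st.2 else st.1)
    = (pvRuns (pvTakeRun p xs).2).foldl (pvG m) (pvG m filtered (t ++ (pvTakeRun p xs).1)) := by
  induction xs generalizing filtered t p with
  | nil => rw [pvTakeRun, pvRuns.eq_1]; simp [pvG]
  | cons x xs ih =>
    simp only [List.foldl_cons]
    by_cases hx : x = p + 1
    · have hstep : pvAStep m (filtered, t) x = (filtered, t ++ [x]) := by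
        unfold pvAStep
        rw [pvLast_pyGet t p h]
        simp [hx]
      rw [hstep]
      have hlast : (t ++ [x]).getLast? = some x := by simp
      rw [ih filtered (t ++ [x]) x hlast]
      simp only [pvTakeRun, if_pos hx]
      simp
    · have hstep : pvAStep m (filtered, t) x = (pvG m filtered t, [x]) := by
        unfold pvAStep pvG
        rw [pvLast_pyGet t p h]
        rw [if_neg hx]
        split <;> rfl
      rw [hstep]
      rw [ih (pvG m filtered t) [x] x (by simp)]
      simp only [pvTakeRun, if_neg hx]
      rw [pvRuns.eq_2]
      simp only [List.foldl_cons]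
      have : pvG m filtered (t ++ []) = pvG m filtered t := by simp
      rw [this]
      rfl

-- runEnd computes exactly the boundary of pvTakeRun's split
theorem pvTakeRun_runEnd (s : List Int) (i : Nat) (hi : i < s.length) :
    pvTakeRun (s.getD i 0) (s.drop (i + 1))
      = ((s.drop (i + 1)).take (pvRunEnd s (i + 1) - (i + 1)), s.drop (pvRunEnd s (i + 1))) := by
  by_cases h1 : i + 1 < s.length
  · have hdrop : s.drop (i + 1) = s.getD (i + 1) 0 :: s.drop (i + 2) := by
      rw [List.getD_eq_getElem s 0 h1]
      rw [List.drop_eq_getElem_cons h1]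
    rw [pvRunEnd]
    rw [dif_pos h1]
    simp only [Nat.add_sub_cancel]
    by_cases hc : s.getD (i + 1) 0 = s.getD i 0 + 1
    · rw [if_pos hc]
      rw [hdrop, pvTakeRun, if_pos hc]
      have ih := pvTakeRun_runEnd s (i + 1) h1
      rw [ih]
      have hge := pvRunEnd_ge s (i + 2)
      have htake : (s.getD (i + 1) 0 :: s.drop (i + 2)).take (pvRunEnd s (i + 2) - (i + 1))
          = s.getD (i + 1) 0 :: (s.drop (i + 2)).take (pvRunEnd s (i + 2) - (i + 2)) := by
        have : pvRunEnd s (i + 2) - (i + 1) = (pvRunEnd s (i + 2) - (i + 2)) + 1 := by omega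
        rw [this, List.take_succ_cons]
      rw [htake]
    · rw [if_neg hc]
      rw [hdrop, pvTakeRun, if_neg hc]
      simp only [← hdrop]
      simp
  · have hdrop : s.drop (i + 1) = [] := List.drop_eq_nil_of_le (by omega)
    rw [pvRunEnd, dif_neg h1]
    simp [hdrop, pvTakeRun]
termination_by s.length - i

-- B's outer loop equals the runs-based fold over the remaining suffix
theorem pvB_runs (s : List Int) (m : Int) (acc : List Int) (i : Nat) :
    pvAltLoop s m acc i = (pvRuns (s.drop i)).foldl (pvG m) acc := by
  rw [pvAltLoop]
  by_cases h : i < s.length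
  · rw [dif_pos h]
    have hdrop : s.drop i = s.getD i 0 :: s.drop (i + 1) := by
      rw [List.getD_eq_getElem s 0 h]
      rw [List.drop_eq_getElem_cons h]
    have htr := pvTakeRun_runEnd s i h
    have hge := pvRunEnd_ge s (i + 1)
    have hle := pvRunEnd_le s (i + 1) (by omega)
    set j := pvRunEnd s (i + 1) with hj
    have ih := pvB_runs s m
      (if m ≤ (j : Int) - (i : Int) then acc ++ PySem.List.slice s (some (i : Int)) (some (j : Int)) else acc) j
    rw [ih]
    rw [hdrop, pvRuns.eq_2, htr]
    simp only [List.foldl_cons]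
    congr 1
    -- the accumulated step equals pvG on the run
    have hslice : PySem.List.slice s (some (i : Int)) (some (j : Int))
        = s.getD i 0 :: (s.drop (i + 1)).take (j - (i + 1)) := by
      rw [PySem.List.slice_natCast]
      have : (s.drop i).take (j - i) = s.getD i 0 :: (s.drop (i + 1)).take (j - (i + 1)) := by
        rw [hdrop]
        have : j - i = (j - (i + 1)) + 1 := by omega
        rw [this, List.take_succ_cons]
      exact this
    have hlen : ((s.getD i 0 :: (s.drop (i + 1)).take (j - (i + 1))).length : Int)
        = (j : Int) - (i : Int) := by
      simp [List.length_take, List.length_drop]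
      omega
    unfold pvG
    rw [hslice, hlen]
  · rw [dif_neg h]
    rw [List.drop_eq_nil_of_le (by omega)]
    rw [pvRuns.eq_1]
    simp
termination_by s.length - i
decreasing_by
  have := pvRunEnd_ge s (i + 1)
  omega

-- ===== VERDICT (by name: the statement is the Claim_ definition above) =====
theorem filter_consecutive_spec : Claim_equal_filter_consecutive := by
  intro lst m _
  unfold Spec_filter_consecutive filter_consecutive filter_consecutive_alt
  by_cases hnil : lst = []
  · simp [hnil]
  · rw [if_neg hnil, if_neg hnil]
    set s := PySem.List.sorted lst (fun x => x) false with hs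
    have hsne : s ≠ [] := by
      rw [hs, Ne, PySem.List.sorted_eq_nil_iff]
      exact hnil
    obtain ⟨x, xs, hsx⟩ := List.exists_cons_of_ne_nil hsne
    have hfold := PySem.List.foldl_pyRange_pyGetD' s 0
      (fun st x => pvAStep m st x) (([], [PySem.List.pyGetD s 0 0]) : List Int × List Int) (a := 1) (by norm_num)
    simp only [hfold]
    have hget0 : PySem.List.pyGetD s 0 0 = x := by
      simp [hsx, PySem.List.pyGetD, PySem.List.pyGet?, PySem.List.pyIdx?]
    have hdrop1 : s.drop (1 : Int).toNat = xs := by simp [hsx]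
    rw [hget0, hdrop1]
    rw [pvA_runs m xs [] [x] x (by simp)]
    rw [pvB_runs s m [] 0]
    rw [List.drop_zero, hsx, pvRuns.eq_2]
    simp only [List.foldl_cons]
    rfl
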